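-- pv_equiv track=rewrite | github.com/vmordan/cvv | web/reports/comparison.py | sort_attrs
-- ===== SOURCE A (Python) =====
-- def sort_attrs(attrs: dict, attrs_vals: dict = {}) -> tuple:
--     attrs_selected = list()
--     attrs_others = list()
--     attrs_vals_selected = list()
--     attrs_vals_others = list()
--     for name, compare in sorted(attrs.items()):
--         if compare:
--             attrs_selected.append((name, True))
--             if attrs_vals:
--                 attrs_vals_selected.append((name, attrs_vals[name]))
--         else:
--             attrs_others.append((name, False))
--             if attrs_vals:
--                 attrs_vals_others.append((name, attrs_vals[name]))
--     sorted_attrs = attrs_selected + attrs_others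
--     sorted_attrs_vals = attrs_vals_selected + attrs_vals_others
--     return sorted_attrs, sorted_attrs_vals
-- ===== SOURCE B (Python) =====
-- def sort_attrs(attrs: dict, attrs_vals: dict = {}) -> tuple:
--     ordered = sorted(attrs.items(), key=lambda kv: (not kv[1], kv[0]))
--     sorted_attrs = [(name, bool(compare)) for name, compare in ordered]
--     sorted_attrs_vals = [(name, attrs_vals[name]) for name, _ in ordered] if attrs_vals else []
--     return sorted_attrs, sorted_attrs_vals
-- ===== Notes on version B (the rewrite author's own statement) =====
-- stated objective: simpler
-- what changed: One sort with the composite key (not compare, name) replaces A's sort-by-name loop with four conditional accumulator buckets; both result lists are plain comprehensions over that single ordered list.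
-- outside the precondition, e.g. on sort_attrs({'a': True}, {'b': '1'}): A raises KeyError, B raises KeyError
import Mathlib
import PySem

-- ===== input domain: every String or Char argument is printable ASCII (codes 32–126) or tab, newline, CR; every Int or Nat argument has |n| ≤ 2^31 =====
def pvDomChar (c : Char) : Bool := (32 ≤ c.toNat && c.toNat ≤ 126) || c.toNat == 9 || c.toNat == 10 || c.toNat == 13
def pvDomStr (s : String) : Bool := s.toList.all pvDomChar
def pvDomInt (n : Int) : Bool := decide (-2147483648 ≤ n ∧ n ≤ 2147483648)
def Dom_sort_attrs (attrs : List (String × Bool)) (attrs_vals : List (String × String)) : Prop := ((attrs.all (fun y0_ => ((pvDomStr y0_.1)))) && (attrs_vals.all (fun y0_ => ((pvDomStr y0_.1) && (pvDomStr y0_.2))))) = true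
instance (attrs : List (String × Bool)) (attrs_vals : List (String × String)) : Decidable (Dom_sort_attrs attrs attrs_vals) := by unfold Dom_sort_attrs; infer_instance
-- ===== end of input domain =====

-- B replaces A's sort-by-name loop with four accumulator buckets by one sort on the
-- composite key (not compare, name) and two comprehensions over it (objective: simpler).

-- ===== PORT A =====
-- attrs_vals[name] is ported as (Dict.ofList attrs_vals).getD name "": under Pre_ the key
-- is always present, so the "" default is never the result on a claimed input.
def sort_attrs (attrs : List (String × Bool)) (attrs_vals : List (String × String)) : (List (String × Bool)) × (List (String × String)) :=
  let r := (PySem.List.sorted attrs (fun p => p.1)).foldl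
    (fun (acc : List (String × Bool) × List (String × Bool) × List (String × String) × List (String × String)) p =>
      if p.2 then
        (acc.1 ++ [(p.1, true)], acc.2.1,
         if attrs_vals = [] then acc.2.2.1 else acc.2.2.1 ++ [(p.1, (PySem.Dict.ofList attrs_vals).getD p.1 "")],
         acc.2.2.2)
      else
        (acc.1, acc.2.1 ++ [(p.1, false)], acc.2.2.1,
         if attrs_vals = [] then acc.2.2.2 else acc.2.2.2 ++ [(p.1, (PySem.Dict.ofList attrs_vals).getD p.1 "")]))
    ([], [], [], [])
  (r.1 ++ r.2.1, r.2.2.1 ++ r.2.2.2)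

-- ===== PORT B =====
-- Python's tuple key (not compare, name) is the lexicographic order on Bool × String: toLex.
def sort_attrs_alt (attrs : List (String × Bool)) (attrs_vals : List (String × String)) : (List (String × Bool)) × (List (String × String)) :=
  let ordered := PySem.List.sorted attrs (fun p => toLex (!p.2, p.1))
  (ordered.map (fun p => (p.1, p.2)),
   if attrs_vals = [] then [] else ordered.map (fun p => (p.1, (PySem.Dict.ofList attrs_vals).getD p.1 "")))

-- ===== PRECONDITION & SPEC =====
-- The lists stand for Python dicts, so Pre_ requires distinct keys (duplicate keys do not
-- arise from a dict); when attrs_vals is non-empty every attrs key must occur in it,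
-- otherwise A raises KeyError.
def Pre_sort_attrs (attrs : List (String × Bool)) (attrs_vals : List (String × String)) : Prop :=
  (attrs.map Prod.fst).Nodup ∧ (attrs_vals.map Prod.fst).Nodup ∧
  (attrs_vals ≠ [] → ∀ p ∈ attrs, p.1 ∈ attrs_vals.map Prod.fst)
instance (attrs : List (String × Bool)) (attrs_vals : List (String × String)) : Decidable (Pre_sort_attrs attrs attrs_vals) := by unfold Pre_sort_attrs; infer_instance

def pvWitness_sort_attrs : (List (String × Bool)) × (List (String × String)) :=
  ([("a", true), ("b", false), ("c", true)], [("a", "1"), ("b", "2"), ("c", "3")])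

def Spec_sort_attrs (attrs : List (String × Bool)) (attrs_vals : List (String × String)) (out : (List (String × Bool)) × (List (String × String))) : Prop := out = sort_attrs_alt attrs attrs_vals
instance (attrs : List (String × Bool)) (attrs_vals : List (String × String)) (out : (List (String × Bool)) × (List (String × String))) : Decidable (Spec_sort_attrs attrs attrs_vals out) := by unfold Spec_sort_attrs; infer_instance

-- ===== CLAIM (what is proved, stated in full; the proofs are below) =====
def Claim_equal_sort_attrs : Prop := ∀ (attrs : List (String × Bool)) (attrs_vals : List (String × String)), Dom_sort_attrs attrs attrs_vals → Pre_sort_attrs attrs attrs_vals → Spec_sort_attrs attrs attrs_vals (sort_attrs attrs attrs_vals)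

-- ===== LEMMAS AND PROOFS =====

-- A's loop, characterised: it files each element of s into one of the four buckets.
theorem loopA (attrs_vals : List (String × String)) :
    ∀ (s : List (String × Bool)) (a b : List (String × Bool)) (c d : List (String × String)),
    s.foldl
      (fun (acc : List (String × Bool) × List (String × Bool) × List (String × String) × List (String × String)) p =>
        if p.2 then
          (acc.1 ++ [(p.1, true)], acc.2.1,
           if attrs_vals = [] then acc.2.2.1 else acc.2.2.1 ++ [(p.1, (PySem.Dict.ofList attrs_vals).getD p.1 "")],
           acc.2.2.2)
        else
          (acc.1, acc.2.1 ++ [(p.1, false)], acc.2.2.1,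
           if attrs_vals = [] then acc.2.2.2 else acc.2.2.2 ++ [(p.1, (PySem.Dict.ofList attrs_vals).getD p.1 "")]))
      (a, b, c, d)
    = (a ++ (s.filter (fun p => p.2)).map (fun p => (p.1, true)),
       b ++ (s.filter (fun p => !p.2)).map (fun p => (p.1, false)),
       c ++ (if attrs_vals = [] then [] else (s.filter (fun p => p.2)).map (fun p => (p.1, (PySem.Dict.ofList attrs_vals).getD p.1 ""))),
       d ++ (if attrs_vals = [] then [] else (s.filter (fun p => !p.2)).map (fun p => (p.1, (PySem.Dict.ofList attrs_vals).getD p.1 "")))) := by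
  intro s
  induction s with
  | nil => intro a b c d; simp
  | cons p t ih =>
    obtain ⟨p1, p2⟩ := p
    intro a b c d
    cases p2 <;>
      (dsimp only [List.foldl_cons, reduceIte]
       rw [ih]
       by_cases hv : attrs_vals = [] <;> simp [hv, List.append_assoc])

-- the sorted-by-(not compare, name) list is: the compared entries of the sorted-by-name
-- list, then the others.
theorem ordered_eq (attrs : List (String × Bool))
    (hnd : (attrs.map Prod.fst).Nodup) :
    PySem.List.sorted attrs (fun p => toLex (!p.2, p.1))
      = (PySem.List.sorted attrs (fun p => p.1)).filter (fun p => p.2)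
        ++ (PySem.List.sorted attrs (fun p => p.1)).filter (fun p => !p.2) := by
  set s := PySem.List.sorted attrs (fun p => p.1) with hs
  have hperm : s.Perm attrs := PySem.List.sorted_perm attrs (fun p => p.1) false
  have hnds : (s.map Prod.fst).Nodup := ((hperm.map Prod.fst).nodup_iff).mpr hnd
  have hle : s.Pairwise (fun a b => a.1 ≤ b.1) := PySem.List.sorted_pairwise attrs (fun p => p.1)
  have hne : s.Pairwise (fun a b => a.1 ≠ b.1) := (List.pairwise_map).mp hnds
  have hlt : s.Pairwise (fun a b : String × Bool => a.1 < b.1) := by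
    have := hle.and hne
    exact this.imp (fun h => lt_of_le_of_ne h.1 h.2)
  apply PySem.List.sorted_eq_of_perm_of_pairwise_lt
  · exact ((List.filter_append_perm _ s).trans hperm)
  · rw [List.pairwise_append]
    refine ⟨List.Pairwise.imp_of_mem ?_ (hlt.sublist List.filter_sublist),
            List.Pairwise.imp_of_mem ?_ (hlt.sublist List.filter_sublist), ?_⟩
    · intro a b ha hb hab
      have ha2 : a.2 = true := by simpa using (List.mem_filter.mp ha).2
      have hb2 : b.2 = true := by simpa using (List.mem_filter.mp hb).2
      exact Prod.Lex.toLex_lt_toLex.mpr (Or.inr ⟨by simp [ha2, hb2], hab⟩)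
    · intro a b ha hb hab
      have ha2 : a.2 = false := by simpa using (List.mem_filter.mp ha).2
      have hb2 : b.2 = false := by simpa using (List.mem_filter.mp hb).2
      exact Prod.Lex.toLex_lt_toLex.mpr (Or.inr ⟨by simp [ha2, hb2], hab⟩)
    · intro a ha b hb
      have ha2 : a.2 = true := by simpa using (List.mem_filter.mp ha).2
      have hb2 : b.2 = false := by simpa using (List.mem_filter.mp hb).2
      exact Prod.Lex.toLex_lt_toLex.mpr (Or.inl (by simp [ha2, hb2]))

-- ===== VERDICT (by name: the statement is the Claim_ definition above) =====
theorem sort_attrs_spec : Claim_equal_sort_attrs := by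
  intro attrs attrs_vals _ hpre
  unfold Spec_sort_attrs sort_attrs sort_attrs_alt
  rw [loopA, ordered_eq attrs hpre.1]
  set s := PySem.List.sorted attrs (fun p => p.1) with hs
  have h1 : ∀ l : List (String × Bool), (∀ p ∈ l, p.2 = true) →
      l.map (fun p => ((p.1 : String), true)) = l.map (fun p => (p.1, p.2)) := by
    intro l h; exact List.map_congr_left (fun p hp => by rw [h p hp])
  have h0 : ∀ l : List (String × Bool), (∀ p ∈ l, p.2 = false) →
      l.map (fun p => ((p.1 : String), false)) = l.map (fun p => (p.1, p.2)) := by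
    intro l h; exact List.map_congr_left (fun p hp => by rw [h p hp])
  simp only [List.nil_append, List.map_append]
  rw [h1 _ (fun p hp => by simpa using (List.mem_filter.mp hp).2),
      h0 _ (fun p hp => by simpa using (List.mem_filter.mp hp).2)]
  by_cases hv : attrs_vals = [] <;> simp [hv]
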